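-- pv_equiv track=rewrite | github.com/anwar-thoyib/pcap_smb | c_smb.py | _showBit
-- ===== SOURCE A (Python) =====
-- def _showBit(flags, bit, msg):
--   hex_num_set = (0, 128, 64, 32, 16, 8, 4, 2, 1)
--   msg += ': '
--   tmp = ''
--   for index, hex_num in enumerate(hex_num_set):
--     if index:
--       if index == bit:
--         if flags & hex_num == hex_num:
--           tmp += '1'
--         else:
--           tmp += '0'
--           msg += 'Not '
--       else:
--         tmp += '.'
--
--       if index == 4:
--         tmp += ' '
--
--   tmp += ' = ' + msg + 'Set'
--   return tmp
-- ===== SOURCE B (Python) =====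
-- def _showBit(flags, bit, msg):
--   cells = ['.'] * 8
--   message = msg + ': '
--   if 1 <= bit <= 8:
--     hex_num = (0, 128, 64, 32, 16, 8, 4, 2, 1)[bit]
--     if flags & hex_num == hex_num:
--       cells[bit - 1] = '1'
--     else:
--       cells[bit - 1] = '0'
--       message += 'Not '
--   return ''.join(cells[:4]) + ' ' + ''.join(cells[4:]) + ' = ' + message + 'Set'
-- ===== Notes on version B (the rewrite author's own statement) =====
-- stated objective: simpler
-- what changed: Replaced the enumerate loop over the flag-mask tuple (with its in-loop index==bit comparisons and space insertion) by a direct construction: an 8-cell '.' list with at most one cell set via a single table lookup, then assembled as take-4 + space + drop-4.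
import Mathlib
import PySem

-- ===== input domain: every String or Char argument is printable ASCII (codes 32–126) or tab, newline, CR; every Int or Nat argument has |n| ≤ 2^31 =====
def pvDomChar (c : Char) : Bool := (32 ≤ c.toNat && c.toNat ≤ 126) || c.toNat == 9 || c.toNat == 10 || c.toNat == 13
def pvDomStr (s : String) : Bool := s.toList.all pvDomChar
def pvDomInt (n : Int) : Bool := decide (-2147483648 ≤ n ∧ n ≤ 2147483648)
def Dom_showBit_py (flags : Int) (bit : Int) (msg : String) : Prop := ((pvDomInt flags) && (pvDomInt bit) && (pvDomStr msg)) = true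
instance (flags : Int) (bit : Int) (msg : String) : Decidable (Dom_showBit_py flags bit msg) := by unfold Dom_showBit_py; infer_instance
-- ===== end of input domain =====

-- B replaces A's enumerate loop by a direct construction of the 8-cell display
-- (simpler decomposition; same cost).

-- ===== PORT A =====
def showBit_py (flags : Int) (bit : Int) (msg : String) : String :=
  let hex_num_set : List Int := [0, 128, 64, 32, 16, 8, 4, 2, 1]
  let msg0 := msg ++ ": "
  let st :=
    (PySem.List.enumerate hex_num_set).foldl
      (fun (st : String × String) p =>
        let (tmp, m) := st
        let (index, hex_num) := p
        if index ≠ 0 then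
          let (tmp, m) :=
            if index = bit then
              if PySem.Int.band flags hex_num = hex_num then
                (tmp ++ "1", m)
              else
                (tmp ++ "0", m ++ "Not ")
            else (tmp ++ ".", m)
          if index = 4 then (tmp ++ " ", m) else (tmp, m)
        else (tmp, m))
      ("", msg0)
  st.1 ++ (" = " ++ st.2 ++ "Set")

-- ===== PORT B =====
def showBit_py_alt (flags : Int) (bit : Int) (msg : String) : String :=
  let cells0 : List Char := List.replicate 8 '.'
  let message0 := msg ++ ": "
  let st :=
    if 1 ≤ bit ∧ bit ≤ 8 then
      let hex_num := PySem.List.pyGetD ([0, 128, 64, 32, 16, 8, 4, 2, 1] : List Int) bit 0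
      if PySem.Int.band flags hex_num = hex_num then
        (cells0.set (bit - 1).toNat '1', message0)
      else
        (cells0.set (bit - 1).toNat '0', message0 ++ "Not ")
    else (cells0, message0)
  String.ofList (st.1.take 4) ++ " " ++ String.ofList (st.1.drop 4) ++ " = " ++ st.2 ++ "Set"

-- ===== PRECONDITION & SPEC =====
def Spec_showBit_py (flags : Int) (bit : Int) (msg : String) (out : String) : Prop := out = showBit_py_alt flags bit msg
instance (flags : Int) (bit : Int) (msg : String) (out : String) : Decidable (Spec_showBit_py flags bit msg out) := by unfold Spec_showBit_py; infer_instance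

-- ===== CLAIM (what is proved, stated in full; the proofs are below) =====
def Claim_equal_showBit_py : Prop := ∀ (flags : Int) (bit : Int) (msg : String), Dom_showBit_py flags bit msg → Spec_showBit_py flags bit msg (showBit_py flags bit msg)

-- ===== LEMMAS AND PROOFS =====

-- ===== VERDICT (by name: the statement is the Claim_ definition above) =====
theorem showBit_py_spec : Claim_equal_showBit_py := by
  intro flags bit msg _dom
  unfold Spec_showBit_py showBit_py showBit_py_alt
  by_cases hb : 1 ≤ bit ∧ bit ≤ 8
  · obtain ⟨h1, h2⟩ := hb
    interval_cases bit <;>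
      simp [PySem.List.enumerate, PySem.List.pyGetD, PySem.List.pyGet?, PySem.List.pyIdx?] <;>
      split_ifs <;>
      simp [String.append_assoc] <;>
      (rw [← String.append_assoc]; congr 1)
  · have e1 : bit ≠ 1 := fun h => hb (by omega)
    have e2 : bit ≠ 2 := fun h => hb (by omega)
    have e3 : bit ≠ 3 := fun h => hb (by omega)
    have e4 : bit ≠ 4 := fun h => hb (by omega)
    have e5 : bit ≠ 5 := fun h => hb (by omega)
    have e6 : bit ≠ 6 := fun h => hb (by omega)
    have e7 : bit ≠ 7 := fun h => hb (by omega)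
    have e8 : bit ≠ 8 := fun h => hb (by omega)
    simp [PySem.List.enumerate, hb, Ne.symm e1, Ne.symm e2, Ne.symm e3, Ne.symm e4,
          Ne.symm e5, Ne.symm e6, Ne.symm e7, Ne.symm e8, String.append_assoc]
    rw [← String.append_assoc]
    congr 1
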